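-- pv_equiv track=rewrite | github.com/MurphyBelmonte/MCPs-101 | finance_tools_pro.py | _score_schema
-- ===== SOURCE A (Python) =====
-- from typing import Optional, Dict, List, Literal
--
-- SYNONYMS = {
--     "invoice_id":  ["invoice no","invoiceno","invoice","invoice number","orderid","order id","order no","billno","bill no","inv no","invno","document number"],
--     "date":        ["invoicedate","invoice date","date","order date","document date","posting date"],
--     "quantity":    ["quantity","qty","qty.","qnty","units","count"],
--     "unit_price":  ["unitprice","unit price","price","rate","unit cost","cost"],
--     "line_total":  ["linetotal","line total","amount","total","value","net amount","gross amount","subtotal"],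
--     "customer":    ["customerid","customer id","customer","client","account","buyer","party","sold-to","sold to","customer code","customer no"],
--     "country":     ["country","region","market"],
--     "description": ["description","item","product","sku name","name","details"],
-- }
--
-- def _score_schema(cols: List[str]) -> int:
--     # simple score: count how many synonym groups have at least one match
--     score = 0
--     for key, syns in SYNONYMS.items():
--         for s in syns:
--             if s in cols:
--                 score += 1
--                 break
--     return score
-- ===== SOURCE B (Python) =====
-- # B: one pass over cols with a precomputed inverted index synonym -> group index;
-- # matched group indices collected in a set, returns its size (A rescans cols per synonym).
-- from typing import Optional, Dict, List, Literal
--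
-- # precomputed inverted index: synonym -> index of its group in SYNONYMS (synonyms are globally unique)
-- SYN2IDX = {
--     "invoice no": 0,
--     "invoiceno": 0,
--     "invoice": 0,
--     "invoice number": 0,
--     "orderid": 0,
--     "order id": 0,
--     "order no": 0,
--     "billno": 0,
--     "bill no": 0,
--     "inv no": 0,
--     "invno": 0,
--     "document number": 0,
--     "invoicedate": 1,
--     "invoice date": 1,
--     "date": 1,
--     "order date": 1,
--     "document date": 1,
--     "posting date": 1,
--     "quantity": 2,
--     "qty": 2,
--     "qty.": 2,
--     "qnty": 2,
--     "units": 2,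
--     "count": 2,
--     "unitprice": 3,
--     "unit price": 3,
--     "price": 3,
--     "rate": 3,
--     "unit cost": 3,
--     "cost": 3,
--     "linetotal": 4,
--     "line total": 4,
--     "amount": 4,
--     "total": 4,
--     "value": 4,
--     "net amount": 4,
--     "gross amount": 4,
--     "subtotal": 4,
--     "customerid": 5,
--     "customer id": 5,
--     "customer": 5,
--     "client": 5,
--     "account": 5,
--     "buyer": 5,
--     "party": 5,
--     "sold-to": 5,
--     "sold to": 5,
--     "customer code": 5,
--     "customer no": 5,
--     "country": 6,
--     "region": 6,
--     "market": 6,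
--     "description": 7,
--     "item": 7,
--     "product": 7,
--     "sku name": 7,
--     "name": 7,
--     "details": 7,
-- }
--
-- def _score_schema(cols: List[str]) -> int:
--     matched = set()
--     for c in cols:
--         i = SYN2IDX.get(c)
--         if i is not None:
--             matched.add(i)
--     return len(matched)
-- ===== Notes on version B (the rewrite author's own statement) =====
-- stated objective: faster
-- what changed: Instead of scanning the column list once per synonym of every group, B uses a precomputed inverted index synonym->group index and makes a single pass over cols, collecting matched group indices in a set and returning its size.
import Mathlib
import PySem

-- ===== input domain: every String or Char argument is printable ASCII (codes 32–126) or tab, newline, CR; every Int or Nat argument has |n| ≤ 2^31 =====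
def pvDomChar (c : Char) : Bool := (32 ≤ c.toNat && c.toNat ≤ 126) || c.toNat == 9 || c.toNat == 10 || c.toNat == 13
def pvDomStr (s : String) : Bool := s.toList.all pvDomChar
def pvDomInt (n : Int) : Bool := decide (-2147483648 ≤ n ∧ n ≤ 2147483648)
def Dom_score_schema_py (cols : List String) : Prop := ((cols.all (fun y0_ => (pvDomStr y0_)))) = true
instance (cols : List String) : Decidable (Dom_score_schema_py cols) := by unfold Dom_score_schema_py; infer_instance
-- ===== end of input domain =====

-- B replaces A's per-synonym scans of cols by one pass over cols with a precomputed
-- inverted index synonym -> group index, collecting matched indices in a set (objective: faster).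

-- ===== PORT A =====
def pvSYNONYMS : List (String × List String) := [
  ("invoice_id", ["invoice no", "invoiceno", "invoice", "invoice number", "orderid", "order id", "order no", "billno", "bill no", "inv no", "invno", "document number"]),
  ("date", ["invoicedate", "invoice date", "date", "order date", "document date", "posting date"]),
  ("quantity", ["quantity", "qty", "qty.", "qnty", "units", "count"]),
  ("unit_price", ["unitprice", "unit price", "price", "rate", "unit cost", "cost"]),
  ("line_total", ["linetotal", "line total", "amount", "total", "value", "net amount", "gross amount", "subtotal"]),
  ("customer", ["customerid", "customer id", "customer", "client", "account", "buyer", "party", "sold-to", "sold to", "customer code", "customer no"]),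
  ("country", ["country", "region", "market"]),
  ("description", ["description", "item", "product", "sku name", "name", "details"])]

-- inner 'for s in syns: if s in cols: score += 1; break'
def pvInnerA (cols : List String) (score : Int) : List String → Int
  | [] => score
  | s :: rest => if cols.contains s then score + 1 else pvInnerA cols score rest

def score_schema_py (cols : List String) : Int :=
  pvSYNONYMS.foldl (fun score g => pvInnerA cols score g.2) 0

-- ===== PORT B =====
-- Source B's precomputed literal inverted index SYN2IDX: synonym -> group index
def pvSyn2Idx : PySem.Dict String Int := PySem.Dict.ofList [
  ("invoice no", 0), ("invoiceno", 0), ("invoice", 0), ("invoice number", 0), ("orderid", 0), ("order id", 0), ("order no", 0), ("billno", 0), ("bill no", 0), ("inv no", 0), ("invno", 0), ("document number", 0), ("invoicedate", 1), ("invoice date", 1), ("date", 1), ("order date", 1), ("document date", 1), ("posting date", 1), ("quantity", 2), ("qty", 2), ("qty.", 2), ("qnty", 2), ("units", 2), ("count", 2), ("unitprice", 3), ("unit price", 3), ("price", 3), ("rate", 3), ("unit cost", 3), ("cost", 3), ("linetotal", 4), ("line total", 4), ("amount", 4), ("total", 4), ("value", 4), ("net amount", 4), ("gross amount", 4), ("subtotal",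 4), ("customerid", 5), ("customer id", 5), ("customer", 5), ("client", 5), ("account", 5), ("buyer", 5), ("party", 5), ("sold-to", 5), ("sold to", 5), ("customer code", 5), ("customer no", 5), ("country", 6), ("region", 6), ("market", 6), ("description", 7), ("item", 7), ("product", 7), ("sku name", 7), ("name", 7), ("details", 7)]

def score_schema_py_alt (cols : List String) : Int :=
  let matched := cols.foldl (fun m c =>
    match pvSyn2Idx.get? c with
    | some i => PySem.Set.add m i
    | none => m) (PySem.Set.empty : PySem.Set Int)
  PySem.Set.len matched

-- ===== PRECONDITION & SPEC =====
def Spec_score_schema_py (cols : List String) (out : Int) : Prop := out = score_schema_py_alt cols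
instance (cols : List String) (out : Int) : Decidable (Spec_score_schema_py cols out) := by unfold Spec_score_schema_py; infer_instance

-- ===== CLAIM (what is proved, stated in full; the proofs are below) =====
def Claim_equal_score_schema_py : Prop := ∀ (cols : List String), Dom_score_schema_py cols → Spec_score_schema_py cols (score_schema_py cols)

-- ===== LEMMAS AND PROOFS =====

-- proof-only helper: pvSYNONYMS with each group replaced by its index
def pvGroupsIdx : List (Int × List String) := (pvSYNONYMS.zipIdx.map (fun gi => ((gi.2 : Int), gi.1.2)))

theorem pvInnerA_eq (cols : List String) (syns : List String) (sc : Int) :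
    pvInnerA cols sc syns = if syns.any (fun s => cols.contains s) then sc + 1 else sc := by
  induction syns with
  | nil => simp [pvInnerA]
  | cons s rest ih =>
    simp only [pvInnerA, List.any_cons, Bool.or_eq_true, ih]
    split_ifs <;> first | rfl | tauto

theorem pvFoldA_eq (cols : List String) (gs : List (String × List String)) (n : Int) :
    gs.foldl (fun score g => pvInnerA cols score g.2) n
      = n + (gs.countP (fun g => g.2.any (fun s => cols.contains s)) : Int) := by
  induction gs generalizing n with
  | nil => simp
  | cons g rest ih =>
    rw [List.foldl_cons, ih, pvInnerA_eq, List.countP_cons]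
    by_cases h : g.2.any (fun s => cols.contains s) = true <;>
      simp only [h, if_true, if_false, Bool.false_eq_true] <;> push_cast <;> ring

set_option maxRecDepth 100000 in
theorem pvItems_syn2idx :
    pvSyn2Idx.items = pvGroupsIdx.flatMap (fun g => g.2.map (fun s => (s, g.1))) := by
  decide

set_option maxRecDepth 100000 in
theorem pvKeys_nodup : pvSyn2Idx.keys.Nodup := by decide

theorem pvLookup_iff (c : String) (k : Int) :
    pvSyn2Idx.get? c = some k ↔ ∃ g ∈ pvGroupsIdx, g.1 = k ∧ c ∈ g.2 := by
  rw [PySem.Dict.get?_eq_some_iff_mem_items pvSyn2Idx c k pvKeys_nodup, pvItems_syn2idx]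
  simp only [List.mem_flatMap, List.mem_map, Prod.mk.injEq]
  constructor
  · rintro ⟨g, hg, s, hs, h1, h2⟩; exact ⟨g, hg, h2, h1 ▸ hs⟩
  · rintro ⟨g, hg, hk, hc⟩; exact ⟨g, hg, c, hc, rfl, hk⟩

set_option maxRecDepth 100000 in
theorem pvMem_foldl (cols : List String) (m : PySem.Set Int) (k : Int) :
    (k ∈ cols.foldl (fun m c =>
        match pvSyn2Idx.get? c with
        | some v => PySem.Set.add m v
        | none => m) m)
      ↔ k ∈ m ∨ ∃ c ∈ cols, pvSyn2Idx.get? c = some k := by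
  induction cols generalizing m with
  | nil => simp
  | cons c rest ih =>
    simp only [List.foldl_cons, List.mem_cons]
    cases h : pvSyn2Idx.get? c with
    | none =>
      rw [ih]
      constructor
      · rintro (hm | ⟨c', hc', hg⟩)
        · exact Or.inl hm
        · exact Or.inr ⟨c', Or.inr hc', hg⟩
      · rintro (hm | ⟨c', hc', hg⟩)
        · exact Or.inl hm
        · rcases hc' with rfl | hc'
          · rw [h] at hg; cases hg
          · exact Or.inr ⟨c', hc', hg⟩
    | some v =>
      rw [ih]
      simp only [PySem.Set.mem_add]
      constructor
      · rintro ((hm | rfl) | hr)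
        · exact Or.inl hm
        · exact Or.inr ⟨c, Or.inl rfl, h⟩
        · rcases hr with ⟨c', hc', hg⟩; exact Or.inr ⟨c', Or.inr hc', hg⟩
      · rintro (hm | ⟨c', hc', hg⟩)
        · exact Or.inl (Or.inl hm)
        · rcases hc' with rfl | hc'
          · rw [h] at hg; injection hg with hv; exact Or.inl (Or.inr hv.symm)
          · exact Or.inr ⟨c', hc', hg⟩

set_option maxRecDepth 100000 in
theorem pvNodup_foldl (cols : List String) (m : PySem.Set Int) (hm : m.Nodup) :
    (cols.foldl (fun m c =>
        match pvSyn2Idx.get? c with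
        | some v => PySem.Set.add m v
        | none => m) m).Nodup := by
  induction cols generalizing m with
  | nil => exact hm
  | cons c rest ih =>
    simp only [List.foldl_cons]
    cases h : pvSyn2Idx.get? c with
    | none => exact ih _ hm
    | some v => exact ih (PySem.Set.add m v) (PySem.Set.nodup_add m v hm)

theorem pvCountP_eq (cols : List String) :
    pvGroupsIdx.countP (fun g => g.2.any (fun s => cols.contains s))
      = pvSYNONYMS.countP (fun g => g.2.any (fun s => cols.contains s)) := by
  unfold pvGroupsIdx
  rw [List.countP_map]
  rfl

-- ===== VERDICT (by name: the statement is the Claim_ definition above) =====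
set_option maxRecDepth 100000 in
theorem score_schema_py_spec : Claim_equal_score_schema_py := by
  intro cols _
  unfold Spec_score_schema_py score_schema_py score_schema_py_alt
  rw [pvFoldA_eq]
  set P : Int × List String → Bool := fun g => g.2.any (fun s => cols.contains s) with hP
  set M := cols.foldl (fun m c =>
      match pvSyn2Idx.get? c with
      | some v => PySem.Set.add m v
      | none => m) (PySem.Set.empty : PySem.Set Int) with hM
  have hMnd : M.Nodup := pvNodup_foldl cols _ List.nodup_nil
  have hLsub : ((pvGroupsIdx.filter P).map Prod.fst).Sublist (pvGroupsIdx.map Prod.fst) :=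
    List.Sublist.map Prod.fst List.filter_sublist
  have hLnd : ((pvGroupsIdx.filter P).map Prod.fst).Nodup :=
    List.Nodup.sublist hLsub (by decide)
  have hmem : ∀ k, k ∈ M ↔ k ∈ (pvGroupsIdx.filter P).map Prod.fst := by
    intro k
    rw [hM, pvMem_foldl]
    simp only [List.mem_map, List.mem_filter, PySem.Set.empty, List.not_mem_nil,
      false_or, hP, List.any_eq_true]
    constructor
    · rintro ⟨c, hc, hg⟩
      rcases (pvLookup_iff c k).mp hg with ⟨g, hgmem, hk, hcg⟩
      exact ⟨g, ⟨hgmem, c, hcg, by simpa using hc⟩, hk⟩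
    · rintro ⟨g, ⟨hgmem, s, hs, hcs⟩, hk⟩
      exact ⟨s, by simpa using hcs, (pvLookup_iff s k).mpr ⟨g, hgmem, hk, hs⟩⟩
  have hperm : M.Perm ((pvGroupsIdx.filter P).map Prod.fst) :=
    (List.perm_ext_iff_of_nodup hMnd hLnd).mpr hmem
  have hlen : M.length = pvSYNONYMS.countP (fun g => g.2.any (fun s => cols.contains s)) := by
    rw [hperm.length_eq, List.length_map, ← List.countP_eq_length_filter, hP, pvCountP_eq]
  simp only [PySem.Set.len, hlen, zero_add]
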